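-- pv_equiv track=rewrite | github.com/rkjones4/ShapeCoder | code/prog_utils.py | func_to_lmbda
-- ===== SOURCE A (Python) =====
-- def func_to_lmbda(raw):
--     s = ''
--     e = ''
--
--     cur = ''
--     cnt = 0
--     for c in raw:
--         if c == '(':
--             if cnt == 0:
--                 s = '(' + cur
--                 e = ')'
--                 cur = ''
--             else:
--                 cur += c
--
--             cnt += 1
--
--
--         elif c == ')' or c == ',' :
--             if cnt == 1:
--
--                 cur = func_to_lmbda(cur)
--                 s += f' {cur}'
--                 cur = ''
--
--             else:
--                 cur += c
--
--             if c == ')':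
--                 cnt -= 1
--
--         else:
--             cur += c
--
--     s += f'{cur}'
--
--     r = s + e
--
--     return r
-- ===== SOURCE B (Python) =====
-- def func_to_lmbda(raw):
--     # Single-pass stack-based reformatter: frames carry (head, closer, mark);
--     # text runs are taken as slices of raw instead of re-parsing nested chunks.
--     stack = [['', '', 0]]  # bottom frame: [s, e, mark]; stack[-1] is the active frame
--     g = 0                  # global paren counter (can go negative at the bottom)
--     for i, c in enumerate(raw):
--         if c == '(':
--             if g >= 0:
--                 f = stack[-1]
--                 f[0] = '(' + raw[f[2]:i]
--                 f[1] = ')'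
--                 f[2] = i + 1
--                 stack.append(['', '', i + 1])
--             g += 1
--         elif c == ')':
--             if g >= 1:
--                 ch = stack.pop()
--                 r = ch[0] + raw[ch[2]:i] + ch[1]
--                 f = stack[-1]
--                 f[0] += ' ' + r
--                 f[2] = i + 1
--             g -= 1
--         elif c == ',':
--             if g >= 1:
--                 ch = stack.pop()
--                 r = ch[0] + raw[ch[2]:i] + ch[1]
--                 f = stack[-1]
--                 f[0] += ' ' + r
--                 f[2] = i + 1
--                 stack.append(['', '', i + 1])
--     f = stack[0]
--     return f[0] + raw[f[2]:] + f[1]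
-- ===== Notes on version B (the rewrite author's own statement) =====
-- stated objective: alternative
-- what changed: A collects each nested call chunk into a buffer and recursively re-parses it at every separator; B is a single-pass stack machine keeping one (head, closer, mark) frame per open paren and assembling the output from slices of the input, never re-scanning a chunk.
import Mathlib
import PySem

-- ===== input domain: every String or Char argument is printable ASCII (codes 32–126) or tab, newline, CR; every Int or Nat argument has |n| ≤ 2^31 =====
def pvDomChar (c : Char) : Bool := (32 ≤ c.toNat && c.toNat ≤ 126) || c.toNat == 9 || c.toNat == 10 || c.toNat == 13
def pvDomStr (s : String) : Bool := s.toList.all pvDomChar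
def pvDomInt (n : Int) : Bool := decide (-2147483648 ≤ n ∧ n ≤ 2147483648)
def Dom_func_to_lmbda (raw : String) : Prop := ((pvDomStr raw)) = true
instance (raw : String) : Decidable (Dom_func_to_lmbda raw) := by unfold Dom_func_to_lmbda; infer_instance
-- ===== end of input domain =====

-- B replaces A's recursive re-parsing of each collected chunk by a one-pass stack
-- machine over the characters (one frame per open paren, marks + slices); objective:
-- alternative algorithm (nested substrings are not re-scanned).

-- ===== PORT A =====
-- A's loop, literally: state (s, e, cur, cnt); on a separator at cnt = 1 the collected
-- chunk `cur` is re-processed by a recursive call, exactly as the Python does.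
def aCore : List Char → List Char → List Char → List Char → Int → List Char
  | [], s, e, cur, _ => s ++ cur ++ e
  | c :: rest, s, e, cur, cnt =>
    if c = '(' then
      if cnt = 0 then aCore rest ('(' :: cur) [')'] [] (cnt + 1)
      else aCore rest s e (cur ++ [c]) (cnt + 1)
    else if c = ')' then
      if cnt = 1 then aCore rest (s ++ ' ' :: aCore cur [] [] [] 0) e [] (cnt - 1)
      else aCore rest s e (cur ++ [c]) (cnt - 1)
    else if c = ',' then
      if cnt = 1 then aCore rest (s ++ ' ' :: aCore cur [] [] [] 0) e [] cnt
      else aCore rest s e (cur ++ [c]) cnt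
    else aCore rest s e (cur ++ [c]) cnt
termination_by pending _ _ cur _ => (pending.length + cur.length, pending.length)
decreasing_by all_goals simp; omega

def func_to_lmbda (raw : String) : String := String.ofList (aCore raw.toList [] [] [] 0)

-- ===== PORT B =====
-- frame = (s, e, mark): the frame's pending raw text is raw[mark:i]
abbrev BFrame := List Char × List Char × Nat
-- machine state = (bottom frame, upper frames top-first, global paren counter)
abbrev BState := BFrame × List BFrame × Int

def bReset (raw : List Char) (i : Nat) (f : BFrame) : BFrame :=
  ('(' :: PySem.List.slice raw (some (f.2.2 : Int)) (some (i : Int)), [')'], i + 1)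

def bFlush (raw : List Char) (i : Nat) (p ch : BFrame) : BFrame :=
  (p.1 ++ ' ' :: (ch.1 ++ PySem.List.slice raw (some (ch.2.2 : Int)) (some (i : Int)) ++ ch.2.1),
   p.2.1, i + 1)

def bStep (raw : List Char) (i : Nat) (c : Char) (st : BState) : BState :=
  let (b, us, g) := st
  if c = '(' then
    if 0 ≤ g then
      match us with
      | [] => (bReset raw i b, [([], [], i + 1)], g + 1)
      | t :: r => (b, ([], [], i + 1) :: bReset raw i t :: r, g + 1)
    else (b, us, g + 1)
  else if c = ')' then
    if 1 ≤ g then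
      match us with
      | [t] => (bFlush raw i b t, [], g - 1)
      | t :: t2 :: r => (b, bFlush raw i t2 t :: r, g - 1)
      | [] => (b, us, g - 1)
    else (b, us, g - 1)
  else if c = ',' then
    if 1 ≤ g then
      match us with
      | [t] => (bFlush raw i b t, [([], [], i + 1)], g)
      | t :: t2 :: r => (b, ([], [], i + 1) :: bFlush raw i t2 t :: r, g)
      | [] => (b, us, g)
    else (b, us, g)
  else (b, us, g)

def bCore (raw : List Char) : Nat → List Char → BState → BState
  | _, [], st => st
  | i, c :: cs, st => bCore raw (i + 1) cs (bStep raw i c st)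

def bFinal (raw : List Char) (st : BState) : List Char :=
  st.1.1 ++ PySem.List.slice raw (some (st.1.2.2 : Int)) none ++ st.1.2.1

def func_to_lmbda_alt (raw : String) : String :=
  String.ofList (bFinal raw.toList (bCore raw.toList 0 raw.toList (([], [], 0), [], 0)))

-- ===== PRECONDITION & SPEC =====
def Spec_func_to_lmbda (raw : String) (out : String) : Prop := out = func_to_lmbda_alt raw
instance (raw : String) (out : String) : Decidable (Spec_func_to_lmbda raw out) := by unfold Spec_func_to_lmbda; infer_instance

-- ===== CLAIM (what is proved, stated in full; the proofs are below) =====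
def Claim_equal_func_to_lmbda : Prop := ∀ (raw : String), Dom_func_to_lmbda raw → Spec_func_to_lmbda raw (func_to_lmbda raw)

-- ===== LEMMAS AND PROOFS =====

-- A's loop state and its one-character step (flush re-runs A on the chunk, as in A)
abbrev AState := List Char × List Char × List Char × Int

def aStep (st : AState) (c : Char) : AState :=
  let (s, e, cur, cnt) := st
  if c = '(' then
    if cnt = 0 then ('(' :: cur, [')'], [], cnt + 1) else (s, e, cur ++ [c], cnt + 1)
  else if c = ')' then
    if cnt = 1 then (s ++ ' ' :: aCore cur [] [] [] 0, e, [], cnt - 1)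
    else (s, e, cur ++ [c], cnt - 1)
  else if c = ',' then
    if cnt = 1 then (s ++ ' ' :: aCore cur [] [] [] 0, e, [], cnt)
    else (s, e, cur ++ [c], cnt)
  else (s, e, cur ++ [c], cnt)

def finalize (st : AState) : List Char := st.1 ++ st.2.2.1 ++ st.2.1

-- raw[m:i] as drop/take
def seg (raw : List Char) (m i : Nat) : List Char := (raw.drop m).take (i - m)

lemma seg_self (raw : List Char) (i : Nat) : seg raw i i = [] := by simp [seg]

lemma seg_snoc (raw : List Char) (m i : Nat) (c : Char)
    (hm : m ≤ i) (hc : raw[i]? = some c) :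
    seg raw m (i + 1) = seg raw m i ++ [c] := by
  have h1 : i + 1 - m = (i - m) + 1 := by omega
  have h2 : (raw.drop m)[i - m]? = some c := by
    rw [List.getElem?_drop]
    have : m + (i - m) = i := by omega
    rw [this, hc]
  simp [seg, h1, List.take_add_one, h2]

lemma seg_all (raw : List Char) (m i : Nat) (hi : raw.length ≤ i) :
    seg raw m i = raw.drop m := by
  apply List.take_of_length_le
  simp; omega

lemma aCore_eq_foldl (pending : List Char) : ∀ (s e cur : List Char) (cnt : Int),
    aCore pending s e cur cnt = finalize (pending.foldl aStep (s, e, cur, cnt)) := by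
  induction pending with
  | nil => intro s e cur cnt; simp [aCore, finalize]
  | cons c rest ih =>
    intro s e cur cnt
    rw [aCore]
    by_cases h1 : c = '('
    · by_cases h2 : cnt = 0 <;> simp [h1, h2, List.foldl_cons, aStep, ih]
    · by_cases h2 : c = ')'
      · by_cases h3 : cnt = 1 <;> simp [h1, h2, h3, List.foldl_cons, aStep, ih]
      · by_cases h3 : c = ','
        · by_cases h4 : cnt = 1 <;> simp [h1, h2, h3, h4, List.foldl_cons, aStep, ih]
        · simp [h1, h2, h3, List.foldl_cons, aStep, ih]

def parentM (fs : List BFrame) (m : Nat) : Nat :=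
  match fs with
  | [] => m
  | p :: _ => p.2.2

-- Chain raw i fs m d: fs (top-first) are the frames above a bottom whose mark is m;
-- the frame at relative depth d from the top of fs has, as its A-loop run over its
-- parent's pending chunk, exactly the state recorded in the frame.
def Chain (raw : List Char) (i : Nat) : List BFrame → Nat → Nat → Prop
  | [], m, _ => m ≤ i
  | f :: fs, m, d =>
      f.2.2 ≤ i ∧
      (seg raw (parentM fs m) i).foldl aStep ([], [], [], 0)
        = (f.1, f.2.1, seg raw f.2.2 i, (d : Int)) ∧
      Chain raw i fs m (d + 1)

lemma chain_base_le (raw : List Char) (i : Nat) :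
    ∀ (fs : List BFrame) (m : Nat) (d : Nat), Chain raw i fs m d → m ≤ i := by
  intro fs
  induction fs with
  | nil => intro m d h; exact h
  | cons f fs ih => intro m d h; exact ih m (d + 1) h.2.2

lemma chain_parent_le (raw : List Char) (i : Nat) (fs : List BFrame) (m d : Nat)
    (h : Chain raw i fs m d) : parentM fs m ≤ i := by
  cases fs with
  | nil => exact h
  | cons f fs => exact h.1

lemma chain_norm (raw : List Char) (i : Nat) (c : Char) (hc : raw[i]? = some c)
    (h1 : c ≠ '(') (h2 : c ≠ ')') (h3 : c ≠ ',') :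
    ∀ (fs : List BFrame) (m d : Nat), Chain raw i fs m d → Chain raw (i + 1) fs m d := by
  intro fs
  induction fs with
  | nil => intro m d h; exact Nat.le_succ_of_le h
  | cons f fs ih =>
    intro m d h
    obtain ⟨hf, heq, hch⟩ := h
    refine ⟨Nat.le_succ_of_le hf, ?_, ih m (d + 1) hch⟩
    rw [seg_snoc raw (parentM fs m) i c (chain_parent_le raw i fs m (d + 1) hch) hc,
        List.foldl_append, heq, seg_snoc raw f.2.2 i c hf hc]
    simp [aStep, h1, h2, h3]

lemma chain_open (raw : List Char) (i : Nat) (hc : raw[i]? = some '(') :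
    ∀ (fs : List BFrame) (m d : Nat), 1 ≤ d →
      Chain raw i fs m d → Chain raw (i + 1) fs m (d + 1) := by
  intro fs
  induction fs with
  | nil => intro m d _ h; exact Nat.le_succ_of_le h
  | cons f fs ih =>
    intro m d hd h
    obtain ⟨hf, heq, hch⟩ := h
    refine ⟨Nat.le_succ_of_le hf, ?_, ih m (d + 1) (by omega) hch⟩
    rw [seg_snoc raw (parentM fs m) i '(' (chain_parent_le raw i fs m (d + 1) hch) hc,
        List.foldl_append, heq, seg_snoc raw f.2.2 i '(' hf hc]
    have hdne : (d : Int) ≠ 0 := by omega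
    simp [aStep, hdne]
    omega

lemma chain_close (raw : List Char) (i : Nat) (hc : raw[i]? = some ')') :
    ∀ (fs : List BFrame) (m d : Nat), 2 ≤ d →
      Chain raw i fs m d → Chain raw (i + 1) fs m (d - 1) := by
  intro fs
  induction fs with
  | nil => intro m d _ h; exact Nat.le_succ_of_le h
  | cons f fs ih =>
    intro m d hd h
    obtain ⟨hf, heq, hch⟩ := h
    have htail : Chain raw (i + 1) fs m (d + 1 - 1) := ih m (d + 1) (by omega) hch
    have htail' : Chain raw (i + 1) fs m ((d - 1) + 1) := by
      have : d + 1 - 1 = (d - 1) + 1 := by omega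
      rwa [this] at htail
    refine ⟨Nat.le_succ_of_le hf, ?_, htail'⟩
    rw [seg_snoc raw (parentM fs m) i ')' (chain_parent_le raw i fs m (d + 1) hch) hc,
        List.foldl_append, heq, seg_snoc raw f.2.2 i ')' hf hc]
    have hdne : (d : Int) ≠ 1 := by omega
    simp [aStep, hdne]
    omega

lemma chain_comma (raw : List Char) (i : Nat) (hc : raw[i]? = some ',') :
    ∀ (fs : List BFrame) (m d : Nat), 2 ≤ d →
      Chain raw i fs m d → Chain raw (i + 1) fs m d := by
  intro fs
  induction fs with
  | nil => intro m d _ h; exact Nat.le_succ_of_le h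
  | cons f fs ih =>
    intro m d hd h
    obtain ⟨hf, heq, hch⟩ := h
    refine ⟨Nat.le_succ_of_le hf, ?_, ih m (d + 1) (by omega) hch⟩
    rw [seg_snoc raw (parentM fs m) i ',' (chain_parent_le raw i fs m (d + 1) hch) hc,
        List.foldl_append, heq, seg_snoc raw f.2.2 i ',' hf hc]
    have hdne : (d : Int) ≠ 1 := by omega
    simp [aStep, hdne]

def StInv (raw : List Char) (i : Nat) (ast : AState) (bst : BState) : Prop :=
  ast = (bst.1.1, bst.1.2.1, seg raw bst.1.2.2 i, bst.2.2) ∧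
  bst.2.1.length = bst.2.2.toNat ∧
  Chain raw i bst.2.1 bst.1.2.2 0

lemma slice_eq_seg (raw : List Char) (m i : Nat) :
    PySem.List.slice raw (some (m : Int)) (some (i : Int)) = seg raw m i := by
  rw [PySem.List.slice_natCast]; rfl

lemma bStep_open_nil (raw : List Char) (i : Nat) (b : BFrame) (g : Int) (hg : 0 ≤ g) :
    bStep raw i '(' (b, [], g) = (bReset raw i b, [([], [], i + 1)], g + 1) := by
  simp [bStep, hg]

lemma bStep_open_cons (raw : List Char) (i : Nat) (b t : BFrame) (r : List BFrame) (g : Int)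
    (hg : 0 ≤ g) :
    bStep raw i '(' (b, t :: r, g) = (b, ([], [], i + 1) :: bReset raw i t :: r, g + 1) := by
  simp [bStep, hg]

lemma bStep_open_neg (raw : List Char) (i : Nat) (b : BFrame) (us : List BFrame) (g : Int)
    (hg : ¬ 0 ≤ g) :
    bStep raw i '(' (b, us, g) = (b, us, g + 1) := by
  simp [bStep, hg]

lemma bStep_close_one (raw : List Char) (i : Nat) (b t : BFrame) (g : Int) (hg : 1 ≤ g) :
    bStep raw i ')' (b, [t], g) = (bFlush raw i b t, [], g - 1) := by
  simp [bStep, hg]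

lemma bStep_close_two (raw : List Char) (i : Nat) (b t t2 : BFrame) (r : List BFrame) (g : Int)
    (hg : 1 ≤ g) :
    bStep raw i ')' (b, t :: t2 :: r, g) = (b, bFlush raw i t2 t :: r, g - 1) := by
  simp [bStep, hg]

lemma bStep_close_low (raw : List Char) (i : Nat) (b : BFrame) (us : List BFrame) (g : Int)
    (hg : ¬ 1 ≤ g) :
    bStep raw i ')' (b, us, g) = (b, us, g - 1) := by
  simp [bStep, hg]

lemma bStep_comma_one (raw : List Char) (i : Nat) (b t : BFrame) (g : Int) (hg : 1 ≤ g) :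
    bStep raw i ',' (b, [t], g) = (bFlush raw i b t, [([], [], i + 1)], g) := by
  simp [bStep, hg]

lemma bStep_comma_two (raw : List Char) (i : Nat) (b t t2 : BFrame) (r : List BFrame) (g : Int)
    (hg : 1 ≤ g) :
    bStep raw i ',' (b, t :: t2 :: r, g) = (b, ([], [], i + 1) :: bFlush raw i t2 t :: r, g) := by
  simp [bStep, hg]

lemma bStep_comma_low (raw : List Char) (i : Nat) (b : BFrame) (us : List BFrame) (g : Int)
    (hg : ¬ 1 ≤ g) :
    bStep raw i ',' (b, us, g) = (b, us, g) := by
  simp [bStep, hg]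

lemma bStep_other (raw : List Char) (i : Nat) (c : Char) (b : BFrame) (us : List BFrame)
    (g : Int) (h1 : c ≠ '(') (h2 : c ≠ ')') (h3 : c ≠ ',') :
    bStep raw i c (b, us, g) = (b, us, g) := by
  simp [bStep, h1, h2, h3]

lemma inv_step (raw : List Char) (i : Nat) (c : Char) (hc : raw[i]? = some c)
    (ast : AState) (bst : BState) (h : StInv raw i ast bst) :
    StInv raw (i + 1) (aStep ast c) (bStep raw i c bst) := by
  obtain ⟨⟨bs, be, bm⟩, us, g⟩ := bst
  obtain ⟨hast, hlen, hch⟩ := h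
  simp only at hast hlen hch
  have hbm : bm ≤ i := chain_base_le raw i us bm 0 hch
  subst hast
  unfold StInv
  by_cases h1 : c = '('
  · subst h1
    by_cases hgp : 0 ≤ g
    · by_cases hg0 : g = 0
      · subst hg0
        have hus : us = [] := by simpa using hlen
        subst hus
        rw [bStep_open_nil raw i (bs, be, bm) 0 le_rfl]
        refine ⟨?_, by simp, ?_, ?_, ?_⟩
        · simp [aStep, bReset, slice_eq_seg, seg_self]
        · simp
        · simp [parentM, bReset, seg_self]
        · exact Nat.le_refl (i + 1)
      · have hg1 : 1 ≤ g := by omega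
        obtain ⟨t, r, hus⟩ : ∃ t r, us = t :: r := by
          cases us with
          | nil => exfalso; simp at hlen; omega
          | cons t r => exact ⟨t, r, rfl⟩
        subst hus
        obtain ⟨ht, heqt, hcht⟩ := hch
        rw [bStep_open_cons raw i (bs, be, bm) t r g hgp]
        refine ⟨?_, ?_, ?_, ?_, ?_, ?_, ?_⟩
        · simp [aStep, hg0, seg_snoc raw bm i '(' hbm hc]
        · simp at hlen ⊢; omega
        · simp
        · simp [parentM, bReset, seg_self]
        · simp [bReset]
        · rw [seg_snoc raw (parentM r bm) i '(' (chain_parent_le raw i r bm 1 hcht) hc,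
              List.foldl_append, heqt]
          simp [aStep, bReset, slice_eq_seg, seg_self]
        · exact chain_open raw i hc r bm 1 le_rfl hcht
    · have hus : us = [] := by
        have : g.toNat = 0 := by omega
        simpa [this] using hlen
      subst hus
      have hg0 : g ≠ 0 := by omega
      rw [bStep_open_neg raw i (bs, be, bm) [] g hgp]
      refine ⟨?_, ?_, ?_⟩
      · simp [aStep, hg0, seg_snoc raw bm i '(' hbm hc]
      · simp; omega
      · exact Nat.le_succ_of_le hbm
  · by_cases h2 : c = ')'
    · subst h2
      by_cases hgp : 1 ≤ g
      · by_cases hg1 : g = 1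
        · subst hg1
          obtain ⟨t, hus⟩ : ∃ t, us = [t] := by
            cases us with
            | nil => exfalso; simp at hlen
            | cons t r =>
              cases r with
              | nil => exact ⟨t, rfl⟩
              | cons _ _ => simp at hlen
          subst hus
          obtain ⟨ht, heqt, _⟩ := hch
          have hflush : aCore (seg raw bm i) [] [] [] 0
              = t.1 ++ seg raw t.2.2 i ++ t.2.1 := by
            rw [aCore_eq_foldl]
            simp only [parentM] at heqt
            rw [heqt]; rfl
          rw [bStep_close_one raw i (bs, be, bm) t 1 le_rfl]
          refine ⟨?_, by simp, ?_⟩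
          · simp [aStep, bFlush, hflush, slice_eq_seg, seg_self, h1]
          · exact Nat.le_refl (i + 1)
        · have hg2 : 2 ≤ g := by omega
          obtain ⟨t, t2, r, hus⟩ : ∃ t t2 r, us = t :: t2 :: r := by
            cases us with
            | nil => exfalso; simp at hlen; omega
            | cons t r =>
              cases r with
              | nil => exfalso; simp at hlen; omega
              | cons t2 r => exact ⟨t, t2, r, rfl⟩
          subst hus
          obtain ⟨ht, heqt, ht2, heqt2, hcht⟩ := hch
          have hcne : (g : Int) ≠ 1 := hg1
          have hflush : aCore (seg raw t2.2.2 i) [] [] [] 0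
              = t.1 ++ seg raw t.2.2 i ++ t.2.1 := by
            rw [aCore_eq_foldl]
            simp only [parentM] at heqt
            rw [heqt]; rfl
          rw [bStep_close_two raw i (bs, be, bm) t t2 r g hgp]
          refine ⟨?_, ?_, ?_, ?_, ?_⟩
          · simp [aStep, hcne, h1, seg_snoc raw bm i ')' hbm hc]
          · simp at hlen ⊢; omega
          · simp [bFlush]
          · rw [seg_snoc raw (parentM r bm) i ')' (chain_parent_le raw i r bm 2 hcht) hc,
                List.foldl_append, heqt2]
            simp [aStep, bFlush, hflush, slice_eq_seg, seg_self]
          · have := chain_close raw i hc r bm 2 le_rfl hcht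
            simpa using this
      · have hus : us = [] := by
          have : g.toNat = 0 := by omega
          simpa [this] using hlen
        subst hus
        have hcne : (g : Int) ≠ 1 := by omega
        rw [bStep_close_low raw i (bs, be, bm) [] g hgp]
        refine ⟨?_, ?_, ?_⟩
        · simp [aStep, hcne, h1, seg_snoc raw bm i ')' hbm hc]
        · simp; omega
        · exact Nat.le_succ_of_le hbm
    · by_cases h3 : c = ','
      · subst h3
        by_cases hgp : 1 ≤ g
        · by_cases hg1 : g = 1
          · subst hg1
            obtain ⟨t, hus⟩ : ∃ t, us = [t] := by
              cases us with
              | nil => exfalso; simp at hlen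
              | cons t r =>
                cases r with
                | nil => exact ⟨t, rfl⟩
                | cons _ _ => simp at hlen
            subst hus
            obtain ⟨ht, heqt, _⟩ := hch
            have hflush : aCore (seg raw bm i) [] [] [] 0
                = t.1 ++ seg raw t.2.2 i ++ t.2.1 := by
              rw [aCore_eq_foldl]
              simp only [parentM] at heqt
              rw [heqt]; rfl
            rw [bStep_comma_one raw i (bs, be, bm) t 1 le_rfl]
            refine ⟨?_, by simp, ?_, ?_, ?_⟩
            · simp [aStep, bFlush, hflush, slice_eq_seg, seg_self, h1, h2]
            · simp
            · simp [parentM, bFlush, seg_self]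
            · exact Nat.le_refl (i + 1)
          · have hg2 : 2 ≤ g := by omega
            obtain ⟨t, t2, r, hus⟩ : ∃ t t2 r, us = t :: t2 :: r := by
              cases us with
              | nil => exfalso; simp at hlen; omega
              | cons t r =>
                cases r with
                | nil => exfalso; simp at hlen; omega
                | cons t2 r => exact ⟨t, t2, r, rfl⟩
            subst hus
            obtain ⟨ht, heqt, ht2, heqt2, hcht⟩ := hch
            have hcne : (g : Int) ≠ 1 := hg1
            have hflush : aCore (seg raw t2.2.2 i) [] [] [] 0
                = t.1 ++ seg raw t.2.2 i ++ t.2.1 := by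
              rw [aCore_eq_foldl]
              simp only [parentM] at heqt
              rw [heqt]; rfl
            rw [bStep_comma_two raw i (bs, be, bm) t t2 r g hgp]
            refine ⟨?_, ?_, ?_, ?_, ?_, ?_, ?_⟩
            · simp [aStep, hcne, h1, h2, seg_snoc raw bm i ',' hbm hc]
            · simp at hlen ⊢; omega
            · simp
            · simp [parentM, bFlush, seg_self]
            · simp [bFlush]
            · rw [seg_snoc raw (parentM r bm) i ',' (chain_parent_le raw i r bm 2 hcht) hc,
                  List.foldl_append, heqt2]
              simp [aStep, bFlush, hflush, slice_eq_seg, seg_self]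
            · exact chain_comma raw i hc r bm 2 le_rfl hcht
        · have hus : us = [] := by
            have : g.toNat = 0 := by omega
            simpa [this] using hlen
          subst hus
          have hcne : (g : Int) ≠ 1 := by omega
          rw [bStep_comma_low raw i (bs, be, bm) [] g hgp]
          refine ⟨?_, ?_, ?_⟩
          · simp [aStep, hcne, h1, h2, seg_snoc raw bm i ',' hbm hc]
          · simpa using hlen
          · exact Nat.le_succ_of_le hbm
      · rw [bStep_other raw i c (bs, be, bm) us g h1 h2 h3]
        refine ⟨?_, hlen, ?_⟩
        · simp [aStep, h1, h2, h3, seg_snoc raw bm i c hbm hc]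
        · exact chain_norm raw i c hc h1 h2 h3 us bm 0 hch

lemma main_sim (raw : List Char) : ∀ (cs : List Char) (i : Nat) (ast : AState) (bst : BState),
    raw.drop i = cs → StInv raw i ast bst →
    finalize (cs.foldl aStep ast) = bFinal raw (bCore raw i cs bst) := by
  intro cs
  induction cs with
  | nil =>
    intro i ast bst hdrop hinv
    obtain ⟨hast, _, hch⟩ := hinv
    have hlen : raw.length ≤ i := List.drop_eq_nil_iff.mp hdrop
    subst hast
    simp [finalize, bCore, bFinal, PySem.List.slice_from_natCast,
      seg_all raw _ i hlen]
  | cons c cs ih =>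
    intro i ast bst hdrop hinv
    have hc : raw[i]? = some c := by
      have h0 := congrArg (fun l => l[0]?) hdrop
      simpa [List.getElem?_drop] using h0
    have hdrop' : raw.drop (i + 1) = cs := by
      have : raw.drop (i + 1) = (raw.drop i).drop 1 := by
        rw [List.drop_drop]
      rw [this, hdrop]; rfl
    rw [List.foldl_cons, bCore]
    exact ih (i + 1) (aStep ast c) (bStep raw i c bst) hdrop'
      (inv_step raw i c hc ast bst hinv)

-- ===== VERDICT (by name: the statement is the Claim_ definition above) =====
theorem func_to_lmbda_spec : Claim_equal_func_to_lmbda := by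
  intro raw _
  unfold Spec_func_to_lmbda func_to_lmbda func_to_lmbda_alt
  congr 1
  rw [aCore_eq_foldl]
  exact main_sim raw.toList raw.toList 0 ([], [], [], 0) (([], [], 0), [], 0) rfl
    ⟨by simp [seg], rfl, Nat.le_refl 0⟩
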